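-- pv_equiv track=rewrite | github.com/pyeventsourcing/event-store-benchmark | python/report_generator/reporting/plotting.py | _reorder_for_row_first_legend
-- ===== SOURCE A (Python) =====
-- from typing import Any, Callable, Dict, List, Optional, Sequence
--
-- def _reorder_for_row_first_legend(items: list[tuple[Any, str]], ncol: int) -> list[tuple[Any, str]]:
--     """Reorder legend items so matplotlib's column-wise packing appears row-wise."""
--     if ncol <= 1 or len(items) <= ncol:
--         return items
--
--     rows = [items[i:i + ncol] for i in range(0, len(items), ncol)]
--     reordered: list[tuple[Any, str]] = []
--     for col in range(ncol):
--         for row in rows: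
--             if col < len(row):
--                 reordered.append(row[col])
--     return reordered
-- ===== SOURCE B (Python) =====
-- def _reorder_for_row_first_legend(items: list, ncol: int) -> list:
--     """Reorder legend items so matplotlib's column-wise packing appears row-wise."""
--     if ncol <= 1 or len(items) <= ncol:
--         return items
--     reordered = []
--     for col in range(ncol):
--         reordered += items[col::ncol]
--     return reordered
-- ===== Notes on version B (the rewrite author's own statement) =====
-- stated objective: simpler
-- what changed: B drops the row-chunking list and the inner bounds-checked loop over rows, and instead concatenates the strided slices items[col::ncol] for each column in one pass.
import Mathlib
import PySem

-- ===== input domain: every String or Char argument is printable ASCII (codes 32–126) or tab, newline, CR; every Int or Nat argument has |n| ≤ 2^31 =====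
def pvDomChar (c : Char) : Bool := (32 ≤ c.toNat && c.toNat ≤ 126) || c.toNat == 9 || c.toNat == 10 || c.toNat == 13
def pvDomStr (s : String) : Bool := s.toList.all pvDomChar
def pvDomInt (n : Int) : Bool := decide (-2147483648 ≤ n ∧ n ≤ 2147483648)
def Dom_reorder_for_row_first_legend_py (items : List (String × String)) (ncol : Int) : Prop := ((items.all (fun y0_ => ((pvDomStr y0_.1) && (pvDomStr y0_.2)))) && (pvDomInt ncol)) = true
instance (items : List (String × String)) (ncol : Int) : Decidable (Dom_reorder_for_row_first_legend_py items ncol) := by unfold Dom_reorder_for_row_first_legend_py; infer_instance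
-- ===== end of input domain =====

-- B replaces A's row-chunking plus bounds-checked column walk by concatenating the
-- strided slices items[col::ncol]; objective: simpler (same O(n) cost).

-- ===== PORT A =====
def reorder_for_row_first_legend_py (items : List (String × String)) (ncol : Int) : List (String × String) :=
  if ncol ≤ 1 ∨ (items.length : Int) ≤ ncol then items
  else
    let rows : List (List (String × String)) :=
      (PySem.List.pyRange 0 (items.length : Int) ncol).map
        (fun i => PySem.List.slice items (some i) (some (i + ncol)))
    (PySem.List.pyRange 0 ncol 1).foldl
      (fun reordered col =>
        rows.foldl
          (fun reordered row =>
            if col < (row.length : Int) then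
              reordered ++ [PySem.List.pyGetD row col ("", "")]
            else reordered)
          reordered)
      []

-- ===== PORT B =====
-- 'reordered += items[col::ncol]': in this branch 2 ≤ ncol, so the step is nonzero and
-- slice? always returns some; '.getD []' only unwraps it.
def reorder_for_row_first_legend_py_alt (items : List (String × String)) (ncol : Int) : List (String × String) :=
  if ncol ≤ 1 ∨ (items.length : Int) ≤ ncol then items
  else
    (PySem.List.pyRange 0 ncol 1).foldl
      (fun reordered col =>
        reordered ++ (PySem.List.slice? items (some col) none ncol).getD [])
      []

-- ===== PRECONDITION & SPEC =====
def Spec_reorder_for_row_first_legend_py (items : List (String × String)) (ncol : Int) (out : List (String × String)) : Prop := out = reorder_for_row_first_legend_py_alt items ncol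
instance (items : List (String × String)) (ncol : Int) (out : List (String × String)) : Decidable (Spec_reorder_for_row_first_legend_py items ncol out) := by unfold Spec_reorder_for_row_first_legend_py; infer_instance

-- ===== CLAIM (what is proved, stated in full; the proofs are below) =====
def Claim_equal_reorder_for_row_first_legend_py : Prop := ∀ (items : List (String × String)) (ncol : Int), Dom_reorder_for_row_first_legend_py items ncol → Spec_reorder_for_row_first_legend_py items ncol (reorder_for_row_first_legend_py items ncol)

-- ===== LEMMAS AND PROOFS =====

theorem percol (xs : List (String × String)) (ncol col : Int)
    (h2 : 2 ≤ ncol) (hlt : ncol < (xs.length : Int)) (hc0 : 0 ≤ col) (hcn : col < ncol) :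
    (((PySem.List.pyRange 0 (xs.length : Int) ncol).map
        (fun i => PySem.List.slice xs (some i) (some (i + ncol)))).filter
        (fun row => decide (col < (row.length : Int)))).map
        (fun row => PySem.List.pyGetD row col ("", ""))
    = (PySem.List.slice? xs (some col) none ncol).getD [] := by
  obtain ⟨c, rfl⟩ : ∃ c : Nat, ncol = (c : Int) := ⟨ncol.toNat, by omega⟩
  obtain ⟨j, rfl⟩ : ∃ j : Nat, col = (j : Int) := ⟨col.toNat, by omega⟩
  set m := xs.length with hm
  have hc : 2 ≤ c := by exact_mod_cast h2
  have hcm : c < m := by exact_mod_cast hlt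
  have hjc : j < c := by exact_mod_cast hcn
  have hjm : j < m := by omega
  set cnt : Nat := (m - j + c - 1) / c with hcnt
  have key : ∀ k : Nat, k < cnt ↔ j + c * k < m := by
    intro k
    rw [hcnt, Nat.lt_iff_add_one_le, Nat.le_div_iff_mul_le (by omega), show (k+1)*c = c*k + c from by ring]
    generalize c * k = t
    omega
  set R : Nat := (m + c - 1) / c with hR
  have hcntR : cnt ≤ R := Nat.div_le_div_right (by omega)
  -- ---------- B side ----------
  have hcnt' : (((m:Int) - j + c - 1) / c).toNat = cnt := by
    rw [show ((m:Int) - j + c - 1) = ((m - j + c - 1 : Nat) : Int) from by omega,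
      ← Int.natCast_div, Int.toNat_natCast]
  have hB : (PySem.List.slice? xs (some (j:Int)) none (c:Int)).getD []
      = (List.range cnt).filterMap (fun k => xs[((j:Int) + (c:Int) * (k:Nat)).toNat]?) := by
    have h1 : ¬((c:Int) < 0) := by omega
    have h2' : ¬((c:Int) = 0) := by
      intro h; exact absurd (by exact_mod_cast h : c = 0) (by omega)
    have h3 : ¬((j:Int) < 0) := by omega
    have h4 : (0:Int) < (c:Int) := by
      exact_mod_cast show 0 < c by omega
    have h5 : (j:Int) < (m:Int) := by exact_mod_cast hjm
    simp only [PySem.List.slice?, PySem.List.sliceIndices]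
    rw [← hm]
    simp only [if_neg h1, if_neg h2', if_neg h3, if_pos h4]
    rw [min_eq_left (le_of_lt h5), if_pos h5, hcnt', Option.getD_some]
  rw [hB]
  -- ---------- A side ----------
  have h4 : (0:Int) < (c:Int) := by exact_mod_cast show 0 < c by omega
  have hRint : ((((m:Int)) - 0 + c - 1) / c).toNat = R := by
    rw [show ((m:Int) - 0 + c - 1) = ((m + c - 1 : Nat) : Int) from by omega,
      ← Int.natCast_div, Int.toNat_natCast]
  rw [PySem.List.pyRange_of_pos 0 (m:Int) h4, if_pos (by exact_mod_cast show 0 < m by omega), hRint]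
  rw [List.map_map]
  have hrow : ∀ k : Nat, PySem.List.slice xs (some ((0:Int) + (c:Int) * (k:Nat)))
      (some ((0:Int) + (c:Int) * (k:Nat) + (c:Int))) = List.take c (List.drop (c*k) xs) := by
    intro k
    rw [show ((0:Int) + (c:Int) * (k:Nat)) = ((c*k : Nat) : Int) from by push_cast; ring]
    exact PySem.List.slice_natCast_add xs (c*k) c
  rw [show ((fun i => PySem.List.slice xs (some i) (some (i + (c:Int)))) ∘ fun k : Nat => (0:Int) + (c:Int) * (k:Nat))
      = fun k : Nat => List.take c (List.drop (c*k) xs) from funext fun k => hrow k]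
  rw [List.filter_map, List.map_map]
  have hpred : ((fun row : List (String × String) => decide ((j:Int) < (row.length : Int)))
      ∘ fun k : Nat => List.take c (List.drop (c*k) xs)) = fun k : Nat => decide (k < cnt) := by
    funext k
    simp only [Function.comp, List.length_take, List.length_drop]
    rw [decide_eq_decide, key k, Nat.cast_lt]
    rw [Nat.lt_min]
    generalize c * k = t
    omega
  rw [hpred]
  have hfil : (List.range R).filter (fun k => decide (k < cnt)) = List.range cnt := by
    rw [show R = cnt + (R - cnt) from by omega, List.range_add, List.filter_append]
    rw [List.filter_eq_self.mpr (by intro a ha; rw [List.mem_range] at ha; simpa using ha)]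
    rw [List.filter_eq_nil_iff.mpr (by
      intro a ha
      rw [List.mem_map] at ha
      obtain ⟨x, _, rfl⟩ := ha
      simp)]
    rw [List.append_nil]
  rw [hfil]
  have hfm : (List.range cnt).filterMap (fun k => xs[((j:Int) + (c:Int) * (k:Nat)).toNat]?)
      = (List.range cnt).map (fun k => xs.getD (j + c*k) ("", "")) := by
    rw [List.filterMap_congr (g := some ∘ fun k : Nat => xs.getD (j + c*k) ("", "")) (by
      intro k hk
      rw [List.mem_range] at hk
      have hidx : j + c*k < m := (key k).mp hk
      rw [show ((j:Int) + (c:Int) * (k:Nat)) = ((j + c*k : Nat) : Int) from by push_cast; ring,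
        Int.toNat_natCast]
      simp only [Function.comp]
      rw [List.getD_eq_getElem?_getD, List.getElem?_eq_getElem hidx, Option.getD_some])]
    exact congrFun List.filterMap_eq_map _
  rw [hfm]
  apply List.map_congr_left
  intro k hk
  rw [List.mem_range] at hk
  simp only [Function.comp]
  rw [PySem.List.pyGetD_natCast, List.getD_eq_getElem?_getD, List.getD_eq_getElem?_getD,
    List.getElem?_take, if_pos hjc, List.getElem?_drop, Nat.add_comm (c*k) j]

-- ===== VERDICT (by name: the statement is the Claim_ definition above) =====
theorem reorder_for_row_first_legend_py_spec : Claim_equal_reorder_for_row_first_legend_py := by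
  intro items ncol _
  unfold Spec_reorder_for_row_first_legend_py reorder_for_row_first_legend_py reorder_for_row_first_legend_py_alt
  by_cases hguard : ncol ≤ 1 ∨ (items.length : Int) ≤ ncol
  · simp [hguard]
  · push Not at hguard
    obtain ⟨h1, h2⟩ := hguard
    rw [if_neg (by push Not; exact ⟨h1, h2⟩), if_neg (by push Not; exact ⟨h1, h2⟩)]
    have hA : ∀ (acc : List (String × String)),
        (PySem.List.pyRange 0 ncol 1).foldl
          (fun reordered col =>
            ((PySem.List.pyRange 0 (items.length : Int) ncol).map
              (fun i => PySem.List.slice items (some i) (some (i + ncol)))).foldl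
              (fun reordered row =>
                if col < (row.length : Int) then
                  reordered ++ [PySem.List.pyGetD row col ("", "")]
                else reordered)
              reordered)
          acc
        = (PySem.List.pyRange 0 ncol 1).foldl
            (fun reordered col =>
              reordered ++ (PySem.List.slice? items (some col) none ncol).getD [])
            acc := by
      intro acc
      apply PySem.List.foldl_congr_mem
      intro acc' col hcol
      rw [PySem.List.foldl_append_ite]
      rw [percol items ncol col (by omega) (by omega)
        (PySem.List.mem_pyRange_one.mp hcol).1 (PySem.List.mem_pyRange_one.mp hcol).2]
    exact (hA []).symm ▸ rfl
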